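-- pv_equiv track=rewrite | github.com/aso5656/cs61A | project/cats/cats.py | shifty_shifts
-- ===== SOURCE A (Python) =====
-- def shifty_shifts(start, goal, limit):
--     """A diff function for autocorrect that determines how many letters
--     in START need to be substituted to create GOAL, then adds the difference in
--     their lengths.
--     """
--
--     # BEGIN PROBLEM 6
--
--     if limit < 0:
--         return 0
--
--     if len(start) * len(goal) == 0:
--             return len(start)+ len(goal)
--
--     elif start[0] != goal[0]:
--         return 1 + shifty_shifts(start[1:], goal[1:], limit-1)
--
--     else:
--         return shifty_shifts(start[1:], goal[1:], limit)
-- ===== SOURCE B (Python) =====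
-- def shifty_shifts(start, goal, limit):
--     """Iterative version: one index loop, mismatch accumulator, no slicing."""
--     i = 0
--     count = 0
--     while True:
--         if limit < 0:
--             return count
--         if i == len(start) or i == len(goal):
--             return count + (len(start) - i) + (len(goal) - i)
--         if start[i] != goal[i]:
--             count += 1
--             limit -= 1
--         i += 1
-- ===== Notes on version B (the rewrite author's own statement) =====
-- stated objective: faster
-- what changed: Replaces the slicing recursion with a single iterative index loop carrying a mismatch accumulator and the remaining limit; no intermediate substrings and no recursion.
import Mathlib
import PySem

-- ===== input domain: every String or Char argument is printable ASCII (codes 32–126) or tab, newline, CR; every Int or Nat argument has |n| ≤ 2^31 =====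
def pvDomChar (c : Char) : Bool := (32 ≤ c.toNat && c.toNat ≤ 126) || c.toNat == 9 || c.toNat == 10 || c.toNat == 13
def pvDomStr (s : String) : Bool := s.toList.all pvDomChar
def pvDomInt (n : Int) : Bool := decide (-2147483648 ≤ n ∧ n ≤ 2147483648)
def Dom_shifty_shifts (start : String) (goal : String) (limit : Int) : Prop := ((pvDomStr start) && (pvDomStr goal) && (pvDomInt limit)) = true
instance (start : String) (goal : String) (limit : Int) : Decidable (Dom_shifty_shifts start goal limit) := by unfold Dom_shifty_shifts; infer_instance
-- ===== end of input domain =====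

-- B replaces A's slicing recursion by a single index loop with a mismatch accumulator (objective: simpler).

-- ===== PORT A =====
-- literal transliteration of A's recursion over the characters
-- (start[0]/goal[0] are the heads, start[1:]/goal[1:] the tails; len(start)*len(goal)==0 kept as is)
def shiftyA (cs ds : List Char) (limit : Int) : Int :=
  if limit < 0 then 0
  else if (cs.length * ds.length) == 0 then (cs.length : Int) + (ds.length : Int)
  else match cs, ds with
    | c :: cs', d :: ds' =>
        if c ≠ d then 1 + shiftyA cs' ds' (limit - 1)
        else shiftyA cs' ds' limit
    | _, _ => 0  -- unreachable: both nonempty here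

def shifty_shifts (start : String) (goal : String) (limit : Int) : Int :=
  shiftyA start.toList goal.toList limit

-- ===== PORT B =====
-- B's while-loop with index i, accumulator count, decreasing limit; ported as a
-- tail recursion that walks both strings (the index i of Source B is the position reached).
def shiftyB (cs ds : List Char) (limit : Int) (count : Int) : Int :=
  if limit < 0 then count
  else match cs, ds with
    | [], _ => count + (0 : Int) + (ds.length : Int)
    | _, [] => count + (cs.length : Int) + (0 : Int)
    | c :: cs', d :: ds' =>
        if c ≠ d then shiftyB cs' ds' (limit - 1) (count + 1)
        else shiftyB cs' ds' limit count

def shifty_shifts_alt (start : String) (goal : String) (limit : Int) : Int :=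
  shiftyB start.toList goal.toList limit 0

-- ===== PRECONDITION & SPEC =====
def Spec_shifty_shifts (start : String) (goal : String) (limit : Int) (out : Int) : Prop := out = shifty_shifts_alt start goal limit
instance (start : String) (goal : String) (limit : Int) (out : Int) : Decidable (Spec_shifty_shifts start goal limit out) := by unfold Spec_shifty_shifts; infer_instance

-- ===== CLAIM (what is proved, stated in full; the proofs are below) =====
def Claim_equal_shifty_shifts : Prop := ∀ (start : String) (goal : String) (limit : Int), Dom_shifty_shifts start goal limit → Spec_shifty_shifts start goal limit (shifty_shifts start goal limit)

-- ===== LEMMAS AND PROOFS =====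

-- loop invariant: B's loop returns the accumulator plus A's recursion value
theorem shiftyB_eq (cs : List Char) : ∀ (ds : List Char) (limit count : Int),
    shiftyB cs ds limit count = count + shiftyA cs ds limit := by
  induction cs with
  | nil =>
    intro ds limit count
    unfold shiftyB shiftyA
    by_cases h : limit < 0 <;> simp [h]
  | cons c cs' ih =>
    intro ds limit count
    unfold shiftyB shiftyA
    by_cases h : limit < 0
    · simp [h]
    · cases ds with
      | nil => simp [h]
      | cons d ds' =>
        by_cases hcd : c = d <;> simp [h, hcd, ih] <;> ring

-- ===== VERDICT (by name: the statement is the Claim_ definition above) =====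
theorem shifty_shifts_spec : Claim_equal_shifty_shifts := by
  intro start goal limit _
  unfold Spec_shifty_shifts shifty_shifts shifty_shifts_alt
  rw [shiftyB_eq]
  ring
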